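-- pv_equiv track=rewrite | github.com/Ahmed-SamirMohamed/automata_practical-exam-4417 | automata_practical exam 4417/DFA/binary_dfa.py | check_ones_divisible_by_3
-- ===== SOURCE A (Python) =====
-- def check_ones_divisible_by_3(input_str):
--     """
--     DFA to check if number of 1s in binary string is divisible by 3.
--     """
--
--     state = 0
--
--     for char in input_str:
--         if char == '1':
--             state = (state + 1) % 3
--         elif char == '0':
--             continue
--         else:
--             return "Invalid input"
--
--     return "Accepted" if state == 0 else "Rejected"
-- ===== SOURCE B (Python) =====
-- def check_ones_divisible_by_3(input_str):
--     # Divide and conquer: ones_mod3 returns the count of '1's mod 3 in s,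
--     # or None if s contains a non-binary character; halves are combined mod 3.
--     def ones_mod3(s):
--         if len(s) <= 1:
--             if s == '' or s == '0':
--                 return 0
--             if s == '1':
--                 return 1
--             return None
--         m = len(s) // 2
--         a = ones_mod3(s[:m])
--         b = ones_mod3(s[m:])
--         if a is None or b is None:
--             return None
--         return (a + b) % 3
--     r = ones_mod3(input_str)
--     if r is None:
--         return "Invalid input"
--     return "Accepted" if r == 0 else "Rejected"
-- ===== Notes on version B (the rewrite author's own statement) =====
-- stated objective: alternative
-- what changed: Replaced the single left-to-right stateful DFA loop by a divide-and-conquer recursion: the string is split in halves, each half independently yields its count of 1s mod 3 (None on an invalid character), and halves are combined by modular addition.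
import Mathlib
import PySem

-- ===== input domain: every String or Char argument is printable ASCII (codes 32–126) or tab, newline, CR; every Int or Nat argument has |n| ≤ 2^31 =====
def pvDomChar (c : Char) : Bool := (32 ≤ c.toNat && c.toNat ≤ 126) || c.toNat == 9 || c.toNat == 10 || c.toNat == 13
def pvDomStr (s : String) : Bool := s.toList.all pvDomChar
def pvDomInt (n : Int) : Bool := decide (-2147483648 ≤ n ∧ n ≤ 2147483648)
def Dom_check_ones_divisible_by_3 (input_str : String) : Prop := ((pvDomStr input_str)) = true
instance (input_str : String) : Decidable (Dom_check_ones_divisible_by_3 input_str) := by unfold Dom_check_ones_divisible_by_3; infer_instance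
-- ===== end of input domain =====

-- B replaces A's stateful left-to-right DFA loop by a divide-and-conquer recursion
-- combining each half's count of 1s mod 3 (alternative decomposition, same cost).

-- ===== PORT A =====
-- the DFA loop: state mod 3, early return on an invalid character
def check_ones_loopA : List Char → Nat → String
  | [], state => if state == 0 then "Accepted" else "Rejected"
  | c :: cs, state =>
      if c == '1' then check_ones_loopA cs ((state + 1) % 3)
      else if c == '0' then check_ones_loopA cs state
      else "Invalid input"

def check_ones_divisible_by_3 (input_str : String) : String :=
  check_ones_loopA input_str.toList 0

-- ===== PORT B =====
-- ones_mod3: count of '1's mod 3, none on an invalid character; halves combined mod 3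
def onesMod3 (l : List Char) : Option Nat :=
  if _h : l.length ≤ 1 then
    match l with
    | [] => some 0
    | c :: _ =>
        if c == '0' then some 0
        else if c == '1' then some 1
        else none
  else
    let m := l.length / 2
    match onesMod3 (l.take m), onesMod3 (l.drop m) with
    | some a, some b => some ((a + b) % 3)
    | _, _ => none
termination_by l.length
decreasing_by
  · simp only [List.length_take]; omega
  · simp only [List.length_drop]; omega

def check_ones_divisible_by_3_alt (input_str : String) : String :=
  match onesMod3 input_str.toList with
  | none => "Invalid input"
  | some r => if r == 0 then "Accepted" else "Rejected"

-- ===== PRECONDITION & SPEC =====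
def Spec_check_ones_divisible_by_3 (input_str : String) (out : String) : Prop := out = check_ones_divisible_by_3_alt input_str
instance (input_str : String) (out : String) : Decidable (Spec_check_ones_divisible_by_3 input_str out) := by unfold Spec_check_ones_divisible_by_3; infer_instance

-- ===== CLAIM (what is proved, stated in full; the proofs are below) =====
def Claim_equal_check_ones_divisible_by_3 : Prop := ∀ (input_str : String), Dom_check_ones_divisible_by_3 input_str → Spec_check_ones_divisible_by_3 input_str (check_ones_divisible_by_3 input_str)

-- ===== LEMMAS AND PROOFS =====

-- characterisation of B's recursion
theorem onesMod3_eq : ∀ (n : ℕ) (l : List Char), l.length = n →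
    onesMod3 l =
      if l.any (fun c => !(c == '0' || c == '1')) then none
      else some (l.count '1' % 3) := by
  intro n
  induction n using Nat.strong_induction_on with
  | _ n ih =>
    intro l hl
    by_cases h : l.length ≤ 1
    · rw [onesMod3]
      simp only [h, dite_true]
      match l with
      | [] => simp
      | [c] =>
        by_cases h0 : c = '0'
        · simp [h0]
        · by_cases h1 : c = '1'
          · simp [h1]
          · simp [h0, h1]
      | a :: b :: rest => simp at h
    · rw [onesMod3]
      simp only [h, dite_false]
      have hm1 : 1 ≤ l.length / 2 := by omega
      have hmlt : l.length / 2 < l.length := by omega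
      rw [ih (l.take (l.length / 2)).length (by simp; omega) _ rfl,
          ih (l.drop (l.length / 2)).length (by simp; omega) _ rfl]
      rw [show l.any (fun c => !(c == '0' || c == '1')) =
            ((l.take (l.length / 2)).any (fun c => !(c == '0' || c == '1')) ||
             (l.drop (l.length / 2)).any (fun c => !(c == '0' || c == '1'))) from by
          rw [← List.any_append, List.take_append_drop],
        show l.count '1' = (l.take (l.length / 2)).count '1' + (l.drop (l.length / 2)).count '1' from by
          rw [← List.count_append, List.take_append_drop]]
      cases hb1 : (l.take (l.length / 2)).any (fun c => !(c == '0' || c == '1')) with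
      | true => simp
      | false =>
        cases hb2 : (l.drop (l.length / 2)).any (fun c => !(c == '0' || c == '1')) with
        | true => simp
        | false =>
          simp only [Bool.or_self, Bool.false_eq_true, if_false]
          congr 1
          omega

-- characterisation of A's loop
theorem check_ones_loopA_eq (l : List Char) (s : Nat) (hs : s < 3) :
    check_ones_loopA l s =
      if l.any (fun c => !(c == '0' || c == '1')) then "Invalid input"
      else if (s + l.count '1') % 3 == 0 then "Accepted" else "Rejected" := by
  induction l generalizing s with
  | nil =>
    simp [check_ones_loopA]
    have : s % 3 = s := Nat.mod_eq_of_lt hs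
    rw [this]
  | cons c cs ih =>
    by_cases h1 : c = '1'
    · subst h1
      rw [show check_ones_loopA ('1' :: cs) s = check_ones_loopA cs ((s + 1) % 3) from rfl,
        ih _ (Nat.mod_lt _ (by norm_num))]
      simp only [List.any_cons, List.count_cons]
      have : ((s + 1) % 3 + cs.count '1') % 3 = (s + (cs.count '1' + 1)) % 3 := by omega
      rw [this]
      simp
    · by_cases h0 : c = '0'
      · subst h0
        rw [show check_ones_loopA ('0' :: cs) s = check_ones_loopA cs s from rfl, ih _ hs]
        simp
      · simp [check_ones_loopA, h0, h1]

-- ===== VERDICT (by name: the statement is the Claim_ definition above) =====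
theorem check_ones_divisible_by_3_spec : Claim_equal_check_ones_divisible_by_3 := by
  intro s _
  unfold Spec_check_ones_divisible_by_3 check_ones_divisible_by_3 check_ones_divisible_by_3_alt
  rw [check_ones_loopA_eq _ _ (by norm_num), onesMod3_eq _ _ rfl]
  cases hbad : s.toList.any (fun c => !(c == '0' || c == '1')) with
  | true => simp
  | false => simp
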